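-- pv_equiv track=rewrite | github.com/michelbl/python-traversal-benchmark | benchmark.py | derecursified_traversal
-- ===== SOURCE A (Python) =====
-- def derecursified_traversal(root, children):
--     genealogy = [[root, 0, 0]]
--
--     while True:
--         node, position, accu = genealogy[-1]
--
--         if position < len(children[node]):
--             child = children[node][position]
--             genealogy.append([child, 0, 0])
--         elif position == len(children[node]):
--             genealogy.pop()
--
--             if len(genealogy) == 0:
--                 return accu + 1
--
--             genealogy[-1][1] += 1
--             genealogy[-1][2] += accu + 1
--         else:
--             assert(False)
-- ===== SOURCE B (Python) =====
-- def derecursified_traversal(root, children):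
--     return 1 + sum(derecursified_traversal(c, children) for c in children[root])
-- ===== Notes on version B (the rewrite author's own statement) =====
-- stated objective: simpler
-- what changed: The explicit worklist of [node, position, accu] frames manipulated in a while-True loop is replaced by direct structural recursion: 1 plus the sum of the counts of the children.
import Mathlib
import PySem

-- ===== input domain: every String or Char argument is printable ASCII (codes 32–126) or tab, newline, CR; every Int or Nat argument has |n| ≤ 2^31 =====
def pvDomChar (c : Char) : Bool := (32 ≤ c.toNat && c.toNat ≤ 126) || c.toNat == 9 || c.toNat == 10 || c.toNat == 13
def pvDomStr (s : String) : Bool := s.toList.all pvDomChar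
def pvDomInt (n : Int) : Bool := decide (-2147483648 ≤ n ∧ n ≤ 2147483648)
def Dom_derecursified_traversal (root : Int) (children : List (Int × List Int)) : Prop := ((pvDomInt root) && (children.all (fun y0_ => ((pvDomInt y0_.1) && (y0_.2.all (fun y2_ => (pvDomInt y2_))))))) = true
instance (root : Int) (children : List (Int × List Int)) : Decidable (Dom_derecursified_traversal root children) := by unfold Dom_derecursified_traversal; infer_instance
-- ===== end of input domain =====

-- B replaces A's explicit stack of [node, position, accu] frames by direct structural
-- recursion (1 plus the sum over children[root]); same return values on Pre_, no speed claim.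

-- ===== PORT A =====

-- children[node] : dict lookup (first match); KeyError = none
def pvLookup (children : List (Int × List Int)) (node : Int) : Option (List Int) :=
  PySem.Dict.get? (PySem.Dict.mk children) node

-- total number of child entries; used only to size the fuel of the while-True loop
def pvKeyLens (children : List (Int × List Int)) : Nat :=
  (children.map (fun p => p.2.length)).sum

-- fuel bound for A's while-True loop: enough iterations for any traversal Pre_ admits
def pvFuelG (K : Nat) : Nat → Nat
  | 0 => 1
  | k + 1 => 1 + K * (1 + pvFuelG K k)

-- one step of A's while-True loop per unit of fuel; the stack top (genealogy[-1]) is the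
-- list head; none = fuel exhausted / KeyError / IndexError (all outside Pre_)
def pvAGo (children : List (Int × List Int)) : Nat → List (Int × Int × Int) → Option Int
  | 0, _ => none
  | _ + 1, [] => none
  | n + 1, (node, position, accu) :: rest =>
    match pvLookup children node with
    | none => none
    | some cs =>
      if position < (cs.length : Int) then
        match PySem.List.pyGet? cs position with
        | none => none
        | some child => pvAGo children n ((child, 0, 0) :: (node, position, accu) :: rest)
      else if position = (cs.length : Int) then
        match rest with
        | [] => some (accu + 1)
        | (n2, p2, a2) :: r => pvAGo children n ((n2, p2 + 1, a2 + accu + 1) :: r)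
      else none

def derecursified_traversal (root : Int) (children : List (Int × List Int)) : Int :=
  (pvAGo children (pvFuelG (pvKeyLens children) (children.length + 1)) [(root, 0, 0)]).getD 0

-- ===== PORT B =====

-- 1 + sum of recursive calls over children[root]; the fuel only guards termination
def pvBGo (children : List (Int × List Int)) : Nat → Int → Int
  | 0, _ => 0
  | n + 1, v =>
    match pvLookup children v with
    | none => 0
    | some cs => 1 + (cs.map (pvBGo children n)).sum

def derecursified_traversal_alt (root : Int) (children : List (Int × List Int)) : Int :=
  pvBGo children (children.length + 1) root

-- ===== PRECONDITION & SPEC =====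

-- a key is acceptable w.r.t. an already-grounded set s: it is present and all its
-- children are in s
def pvOkRow (children : List (Int × List Int)) (s : List Int) (k : Int) : Bool :=
  match pvLookup children k with
  | none => false
  | some cs => cs.all (fun c => decide (c ∈ s))

-- one round of grounding: the keys acceptable w.r.t. the current grounded set
def pvStep (children : List (Int × List Int)) (s : List Int) : List Int :=
  (children.map Prod.fst).filter (pvOkRow children s)

-- the same least fixpoint, iterated with an early exit once a round adds no key;
-- the first argument only counts the remaining rounds (one per entry suffices)
def pvIterF (children : List (Int × List Int)) : List (Int × List Int) → List Int → List Int
  | [], s => s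
  | _ :: rest, s =>
    let s' := pvStep children s
    if s'.length = s.length then s else pvIterF children rest s'

-- Pre_ = exactly the inputs on which Python A returns: the subtree under root is
-- well-founded and fully keyed (otherwise A raises KeyError or loops forever), stated
-- as the standard decidable groundedness check (root is in the least fixpoint of
-- "present with all children grounded", reached within one round per entry).
def Pre_derecursified_traversal (root : Int) (children : List (Int × List Int)) : Prop :=
  root ∈ pvIterF children children []
instance (root : Int) (children : List (Int × List Int)) : Decidable (Pre_derecursified_traversal root children) := by unfold Pre_derecursified_traversal; infer_instance

def pvWitness_derecursified_traversal : Int × (List (Int × List Int)) :=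
  (0, [(0, [1, 2]), (1, []), (2, [3]), (3, [])])

def Spec_derecursified_traversal (root : Int) (children : List (Int × List Int)) (out : Int) : Prop := out = derecursified_traversal_alt root children
instance (root : Int) (children : List (Int × List Int)) (out : Int) : Decidable (Spec_derecursified_traversal root children out) := by unfold Spec_derecursified_traversal; infer_instance

-- ===== CLAIM (what is proved, stated in full; the proofs are below) =====
def Claim_equal_derecursified_traversal : Prop := ∀ (root : Int) (children : List (Int × List Int)), Dom_derecursified_traversal root children → Pre_derecursified_traversal root children → Spec_derecursified_traversal root children (derecursified_traversal root children)

-- ===== LEMMAS AND PROOFS =====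

-- grounded keys, by bounded least-fixpoint iteration (stable after one round per key)
def pvIter (children : List (Int × List Int)) : Nat → List Int
  | 0 => []
  | n + 1 => pvStep children (pvIter children n)

lemma pvLookup_mem_pair {children : List (Int × List Int)} {v : Int} {cs : List Int}
    (h : pvLookup children v = some cs) : (v, cs) ∈ children := by
  induction children with
  | nil => simp [pvLookup, PySem.Dict.get?] at h
  | cons p t ih =>
    rw [pvLookup, PySem.Dict.get?_mk_cons] at h
    by_cases hk : p.1 == v
    · simp [hk] at h
      have hv : p.1 = v := by simpa using hk
      have hp : p = (v, cs) := by rw [Prod.ext_iff]; exact ⟨hv, h⟩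
      rw [← hp]; exact List.mem_cons_self ..
    · simp [hk] at h
      right; exact ih h

lemma pvIter_mem {children : List (Int × List Int)} {n : Nat} {v : Int}
    (h : v ∈ pvIter children (n + 1)) :
    v ∈ children.map Prod.fst ∧
      ∃ cs, pvLookup children v = some cs ∧ ∀ c ∈ cs, c ∈ pvIter children n := by
  rw [pvIter, pvStep, List.mem_filter] at h
  obtain ⟨hk, hrow⟩ := h
  refine ⟨hk, ?_⟩
  rw [pvOkRow] at hrow
  cases hlk : pvLookup children v with
  | none => rw [hlk] at hrow; simp at hrow
  | some cs =>
    rw [hlk] at hrow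
    refine ⟨cs, rfl, ?_⟩
    intro c hc
    have := List.all_eq_true.mp hrow c hc
    simpa using this

lemma pvIter_intro {children : List (Int × List Int)} {n : Nat} {v : Int} {cs : List Int}
    (hk : v ∈ children.map Prod.fst) (hlk : pvLookup children v = some cs)
    (hch : ∀ c ∈ cs, c ∈ pvIter children n) : v ∈ pvIter children (n + 1) := by
  rw [pvIter, pvStep, List.mem_filter]
  refine ⟨hk, ?_⟩
  rw [pvOkRow, hlk]
  exact List.all_eq_true.mpr (fun c hc => by simpa using hch c hc)

lemma pvIter_succ_sub (children : List (Int × List Int)) :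
    ∀ n, ∀ v ∈ pvIter children n, v ∈ pvIter children (n + 1) := by
  intro n
  induction n with
  | zero => intro v hv; simp [pvIter] at hv
  | succ n ih =>
    intro v hv
    obtain ⟨hk, cs, hlk, hch⟩ := pvIter_mem hv
    exact pvIter_intro hk hlk (fun c hc => ih c (hch c hc))

lemma pvIter_mono (children : List (Int × List Int)) {m n : Nat} (h : m ≤ n) :
    ∀ v ∈ pvIter children m, v ∈ pvIter children n := by
  induction h with
  | refl => exact fun v hv => hv
  | step h ih => exact fun v hv => pvIter_succ_sub children _ v (ih v hv)

lemma pvIterF_eq_pvIter (children : List (Int × List Int)) :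
    ∀ (fuel : List (Int × List Int)) k, ∃ r, r ≤ k + fuel.length ∧
      pvIterF children fuel (pvIter children k) = pvIter children r := by
  intro fuel
  induction fuel with
  | nil => intro k; exact ⟨k, by simp, rfl⟩
  | cons hd rest ih =>
    intro k
    rw [pvIterF]
    by_cases hlen : (pvStep children (pvIter children k)).length = (pvIter children k).length
    · exact ⟨k, by simp, by simp [hlen]⟩
    · simp only [hlen, if_false]
      obtain ⟨r, hr, heq⟩ := ih (k + 1)
      exact ⟨r, by simp at hr ⊢; omega, by rw [← heq]; rfl⟩

lemma pvFuelG_mono (K : Nat) : ∀ {a b : Nat}, a ≤ b → pvFuelG K a ≤ pvFuelG K b := by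
  have hstep : ∀ k, pvFuelG K k ≤ pvFuelG K (k + 1) := by
    intro k
    show pvFuelG K k ≤ 1 + K * (1 + pvFuelG K k)
    cases K with
    | zero =>
      have hz : ∀ j, pvFuelG 0 j = 1 := by intro j; induction j <;> simp [pvFuelG, *]
      simp [hz]
    | succ K' =>
      have := Nat.le_mul_of_pos_left (1 + pvFuelG (K' + 1) k) (show 0 < K' + 1 by omega)
      omega
  intro a b h
  induction h with
  | refl => exact le_refl _
  | step h ih => exact le_trans ih (hstep _)

lemma pvBGo_stable (children : List (Int × List Int)) :
    ∀ n v, v ∈ pvIter children n → ∀ f1 f2, n ≤ f1 → n ≤ f2 →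
      pvBGo children f1 v = pvBGo children f2 v := by
  intro n
  induction n with
  | zero => intro v hv; simp [pvIter] at hv
  | succ n ih =>
    intro v hv f1 f2 h1 h2
    obtain ⟨a, rfl⟩ : ∃ a, f1 = a + 1 := ⟨f1 - 1, by omega⟩
    obtain ⟨b, rfl⟩ : ∃ b, f2 = b + 1 := ⟨f2 - 1, by omega⟩
    obtain ⟨hk, cs, hlk, hch⟩ := pvIter_mem hv
    simp only [pvBGo, hlk]
    congr 2
    apply List.map_congr_left
    intro c hc
    exact ih c (hch c hc) a b (by omega) (by omega)

-- canonical count of the subtree below v (the value B computes)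
def pvC (children : List (Int × List Int)) (v : Int) : Int :=
  pvBGo children (children.length + 1) v

lemma pvC_eq (children : List (Int × List Int)) {n : Nat} {v : Int} {cs : List Int}
    (hn : n ≤ children.length) (hv : v ∈ pvIter children (n + 1))
    (hlk : pvLookup children v = some cs) :
    pvC children v = 1 + (cs.map (pvC children)).sum := by
  obtain ⟨hk, cs', hlk', hch⟩ := pvIter_mem hv
  rw [hlk] at hlk'
  obtain rfl : cs = cs' := by injection hlk'
  rw [pvC]
  simp only [pvBGo, hlk]
  congr 2
  apply List.map_congr_left
  intro c hc
  have hc_len : c ∈ pvIter children children.length :=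
    pvIter_mono children hn c (hch c hc)
  exact pvBGo_stable children children.length c hc_len _ _ (by omega) (by omega)

-- what A's machine does once the popped frame's result is known
def pvAfter (children : List (Int × List Int)) (fuel : Nat)
    (st : List (Int × Int × Int)) (res : Int) : Option Int :=
  match st with
  | [] => some res
  | (n2, p2, a2) :: r => pvAGo children fuel ((n2, p2 + 1, a2 + res) :: r)

-- A's machine consumes an exact number s of iterations to fold away the subtree at v
lemma pvMachine_aux (children : List (Int × List Int)) :
    ∀ n, n ≤ children.length + 1 → ∀ v ∈ pvIter children n,
      ∃ s : Nat, s ≤ pvFuelG (pvKeyLens children) n ∧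
        ∀ fuel st, pvAGo children (s + fuel) ((v, 0, 0) :: st) =
          pvAfter children fuel st (pvC children v) := by
  intro n
  induction n with
  | zero => intro _ v hv; simp [pvIter] at hv
  | succ n ih =>
    intro hn1 v hv
    obtain ⟨hk, cs, hlk, hch⟩ := pvIter_mem hv
    have inner : ∀ (suffix pre : List Int), cs = pre ++ suffix →
        ∃ s : Nat,
          s ≤ 1 + suffix.length * (1 + pvFuelG (pvKeyLens children) n) ∧
          ∀ fuel (a : Int) st,
            pvAGo children (s + fuel) ((v, (pre.length : Int), a) :: st) =
              pvAfter children fuel st (a + (suffix.map (pvC children)).sum + 1) := by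
      intro suffix
      induction suffix with
      | nil =>
        intro pre hpre
        refine ⟨1, by omega, ?_⟩
        intro fuel a st
        have hlen : (pre.length : Int) = (cs.length : Int) := by rw [hpre]; simp
        rw [show 1 + fuel = fuel + 1 by omega]
        simp only [pvAGo, hlk]
        rw [hlen]
        simp only [lt_irrefl, if_false]
        cases st with
        | nil => simp [pvAfter]
        | cons top r =>
          obtain ⟨n2, p2, a2⟩ := top
          simp [pvAfter]
          ring_nf
      | cons c rest ihr =>
        intro pre hpre
        have hc_in : c ∈ cs := by rw [hpre]; simp
        obtain ⟨sc, hsc_le, hsc⟩ := ih (by omega) c (hch c hc_in)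
        obtain ⟨sr, hsr_le, hsr⟩ := ihr (pre ++ [c]) (by rw [hpre]; simp)
        refine ⟨1 + sc + sr, ?_, ?_⟩
        · simp only [List.length_cons]
          have hmul : (rest.length + 1) * (1 + pvFuelG (pvKeyLens children) n)
              = rest.length * (1 + pvFuelG (pvKeyLens children) n)
                + (1 + pvFuelG (pvKeyLens children) n) := by ring
          omega
        · intro fuel a st
          rw [show 1 + sc + sr + fuel = (sc + (sr + fuel)) + 1 by omega]
          simp only [pvAGo, hlk]
          have hlt : (pre.length : Int) < (cs.length : Int) := by
            rw [hpre]; simp only [List.length_append, List.length_cons]; push_cast; omega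
          rw [if_pos hlt]
          have hget : PySem.List.pyGet? cs ((pre.length : Nat) : Int) = some c := by
            rw [PySem.List.pyGet?_natCast, hpre, List.getElem?_append_right (le_refl _)]
            simp
          rw [hget]
          dsimp only
          rw [hsc (sr + fuel) ((v, (pre.length : Int), a) :: st)]
          simp only [pvAfter]
          have hpos : ((pre.length : Int) + 1) = (((pre ++ [c]).length : Nat) : Int) := by
            simp
          rw [hpos, hsr fuel (a + pvC children c) st]
          congr 1
          simp only [List.map_cons, List.sum_cons]
          ring
    obtain ⟨s, hs_le, hs⟩ := inner cs [] rfl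
    have hlenK : cs.length ≤ pvKeyLens children := by
      apply List.le_sum_of_mem
      exact List.mem_map.mpr ⟨(v, cs), pvLookup_mem_pair hlk, rfl⟩
    refine ⟨s, ?_, ?_⟩
    · have hmul : cs.length * (1 + pvFuelG (pvKeyLens children) n) ≤
          pvKeyLens children * (1 + pvFuelG (pvKeyLens children) n) :=
        Nat.mul_le_mul_right _ hlenK
      show s ≤ 1 + pvKeyLens children * (1 + pvFuelG (pvKeyLens children) n)
      omega
    · intro fuel st
      have h0 := hs fuel 0 st
      simp only [List.length_nil, Nat.cast_zero] at h0
      rw [show (0 : Int) + (cs.map (pvC children)).sum + 1 = pvC children v from by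
        rw [pvC_eq children (by omega) hv hlk]; ring] at h0
      exact h0

-- ===== VERDICT (by name: the statement is the Claim_ definition above) =====
theorem derecursified_traversal_spec : Claim_equal_derecursified_traversal := by
  intro root children _hdom hpre
  obtain ⟨r, hr, heq⟩ := pvIterF_eq_pvIter children children 0
  rw [show pvIter children 0 = [] from rfl] at heq
  rw [Pre_derecursified_traversal, heq] at hpre
  obtain ⟨s, hsle, hs⟩ := pvMachine_aux children r (by omega) root hpre
  have hsle' : s ≤ pvFuelG (pvKeyLens children) (children.length + 1) :=
    le_trans hsle (pvFuelG_mono _ (by omega))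
  have hrun := hs (pvFuelG (pvKeyLens children) (children.length + 1) - s) []
  rw [show s + (pvFuelG (pvKeyLens children) (children.length + 1) - s)
      = pvFuelG (pvKeyLens children) (children.length + 1) by omega] at hrun
  show derecursified_traversal root children = derecursified_traversal_alt root children
  unfold derecursified_traversal
  rw [hrun]
  simp [pvAfter, pvC, derecursified_traversal_alt]
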